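-- pv_equiv track=rewrite | github.com/moonkaicuzui/qip-dashboard | comprehensive_condition_analysis.py | analyze_hardcoded_conditions
-- ===== SOURCE A (Python) =====
-- def analyze_hardcoded_conditions(emp_type, position):
--     """하드코딩된 조건 분석 시뮬레이션"""
--     # 조건 ID 매핑
--     # 1-4: 출근 조건
--     # 5: 개인 AQL 당월
--     # 6: 개인 AQL 3개월 연속
--     # 7: 부하직원/팀 AQL
--     # 8: 구역 reject율
--     # 9: 5PRS 통과율
--     # 10: 5PRS 검사량
--
--     # 관리자급 판별
--     manager_positions = [
--         'SUPERVISOR', '(V) SUPERVISOR', '(VICE) SUPERVISOR', 'V.SUPERVISOR',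
--         'MANAGER', 'A.MANAGER', 'ASSISTANT MANAGER', 'SENIOR MANAGER'
--     ]
--     is_manager = any(pos in position.upper() for pos in manager_positions)
--
--     # 기본값 설정 (모든 조건 적용)
--     applicable = {1: True, 2: True, 3: True, 4: True, 5: True, 6: True, 7: True, 8: True, 9: True, 10: True}
--
--     if emp_type == 'TYPE-1':
--         # TYPE-1은 기본적으로 모든 조건이 True로 시작
--
--         if 'ASSEMBLY INSPECTOR' in position:
--             applicable[5] = True  # 명시적 설정 (수정된 부분)
--             applicable[6] = True  # 명시적 설정 (수정된 부분)
--             applicable[7] = False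
--             applicable[8] = False
--             # 9, 10은 True 유지
--
--         elif 'AQL INSPECTOR' in position:
--             applicable[6] = False
--             applicable[7] = False
--             applicable[8] = False
--             applicable[9] = False
--             applicable[10] = False
--
--         elif is_manager:
--             # 관리자급
--             applicable[5] = False
--             applicable[6] = False
--             applicable[7] = False
--             applicable[8] = False
--             applicable[9] = False
--             applicable[10] = False
--
--         elif 'LINE LEADER' in position:
--             applicable[5] = False
--             applicable[6] = False
--             # 7번은 True 유지
--             applicable[8] = False
--             applicable[9] = False
--             applicable[10] = False
--
--         elif 'AUDIT' in position or 'TRAINING' in position: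
--             applicable[5] = False
--             applicable[6] = False
--             # 7, 8번은 True 유지
--             applicable[9] = False
--             applicable[10] = False
--
--         elif 'MODEL MASTER' in position:
--             applicable[5] = False
--             applicable[6] = False
--             applicable[7] = False
--             # 8번은 True 유지
--             applicable[9] = False
--             applicable[10] = False
--
--         elif 'GROUP LEADER' in position:
--             applicable[5] = False
--             applicable[6] = False
--             applicable[7] = False
--             applicable[8] = False
--             applicable[9] = False
--             applicable[10] = False
--
--     elif emp_type == 'TYPE-2':
--         # TYPE-2는 출근 조건만
--         for i in range(5, 11):
--             applicable[i] = False
--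
--     elif emp_type == 'TYPE-3':
--         # TYPE-3는 이제 처리 로직이 추가됨 - 모든 조건 False
--         for i in range(1, 11):
--             applicable[i] = False
--
--     return applicable
-- ===== SOURCE B (Python) =====
-- MANAGER_POSITIONS = [
--     'SUPERVISOR', '(V) SUPERVISOR', '(VICE) SUPERVISOR', 'V.SUPERVISOR',
--     'MANAGER', 'A.MANAGER', 'ASSISTANT MANAGER', 'SENIOR MANAGER'
-- ]
--
-- # Column-oriented table: for each condition 5..10, the set of TYPE-1 categories
-- # (by priority index; None = no category matched) on which the condition applies.
-- TRUE_CATS = {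
--     5: {0, 1, None},
--     6: {0, None},
--     7: {3, 4, None},
--     8: {4, 5, None},
--     9: {0, None},
--     10: {0, None},
-- }
--
--
-- def analyze_hardcoded_conditions(emp_type, position):
--     """Per-condition membership test against the category index (column-wise)."""
--     if emp_type == 'TYPE-3':
--         return {i: False for i in range(1, 11)}
--     if emp_type == 'TYPE-2':
--         return {i: i <= 4 for i in range(1, 11)}
--     if emp_type != 'TYPE-1':
--         return {i: True for i in range(1, 11)}
--     preds = [
--         'ASSEMBLY INSPECTOR' in position,
--         'AQL INSPECTOR' in position,
--         any(pos in position.upper() for pos in MANAGER_POSITIONS),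
--         'LINE LEADER' in position,
--         'AUDIT' in position or 'TRAINING' in position,
--         'MODEL MASTER' in position,
--         'GROUP LEADER' in position,
--     ]
--     cat = next((k for k, p in enumerate(preds) if p), None)
--     return {i: i <= 4 or cat in TRUE_CATS[i] for i in range(1, 11)}
-- ===== Notes on version B (the rewrite author's own statement) =====
-- stated objective: alternative
-- what changed: Inverts the data structure: instead of mutating a flag dict per matched category branch, B computes the first-matching category index once and decides each condition 5-10 independently by membership of that index in a per-condition set of applicable categories.
import Mathlib
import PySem

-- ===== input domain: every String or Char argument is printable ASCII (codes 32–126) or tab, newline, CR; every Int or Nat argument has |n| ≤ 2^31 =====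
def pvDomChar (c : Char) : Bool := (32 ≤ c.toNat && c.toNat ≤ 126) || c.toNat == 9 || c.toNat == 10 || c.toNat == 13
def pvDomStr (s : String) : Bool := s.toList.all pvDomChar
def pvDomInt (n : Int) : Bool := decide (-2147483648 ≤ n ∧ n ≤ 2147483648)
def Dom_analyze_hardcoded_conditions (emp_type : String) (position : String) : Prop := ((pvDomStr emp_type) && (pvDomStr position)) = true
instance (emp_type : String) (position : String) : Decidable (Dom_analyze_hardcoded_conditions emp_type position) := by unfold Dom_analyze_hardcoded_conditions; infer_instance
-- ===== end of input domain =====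

-- B inverts the data structure: it computes the first-matching category index once and decides each condition by membership in a per-condition category set (objective: alternative).


-- ===== PORT A =====
def pvManagerPositions : List String :=
  ["SUPERVISOR", "(V) SUPERVISOR", "(VICE) SUPERVISOR", "V.SUPERVISOR",
   "MANAGER", "A.MANAGER", "ASSISTANT MANAGER", "SENIOR MANAGER"]

def analyze_hardcoded_conditions (emp_type : String) (position : String) : List (Int × Bool) :=
  let is_manager := pvManagerPositions.any (fun pos => PySem.Str.isIn pos (PySem.Str.upper position))
  let applicable : PySem.Dict Int Bool := PySem.Dict.ofList
    [(1, true), (2, true), (3, true), (4, true), (5, true), (6, true), (7, true), (8, true), (9, true), (10, true)]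
  let applicable :=
    if emp_type == "TYPE-1" then
      if PySem.Str.isIn "ASSEMBLY INSPECTOR" position then
        ((((applicable.insert 5 true).insert 6 true).insert 7 false).insert 8 false)
      else if PySem.Str.isIn "AQL INSPECTOR" position then
        (((((applicable.insert 6 false).insert 7 false).insert 8 false).insert 9 false).insert 10 false)
      else if is_manager then
        ((((((applicable.insert 5 false).insert 6 false).insert 7 false).insert 8 false).insert 9 false).insert 10 false)
      else if PySem.Str.isIn "LINE LEADER" position then
        (((((applicable.insert 5 false).insert 6 false).insert 8 false).insert 9 false).insert 10 false)
      else if PySem.Str.isIn "AUDIT" position || PySem.Str.isIn "TRAINING" position then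
        ((((applicable.insert 5 false).insert 6 false).insert 9 false).insert 10 false)
      else if PySem.Str.isIn "MODEL MASTER" position then
        (((((applicable.insert 5 false).insert 6 false).insert 7 false).insert 9 false).insert 10 false)
      else if PySem.Str.isIn "GROUP LEADER" position then
        ((((((applicable.insert 5 false).insert 6 false).insert 7 false).insert 8 false).insert 9 false).insert 10 false)
      else applicable
    else if emp_type == "TYPE-2" then
      (PySem.List.pyRange 5 11 1).foldl (fun d i => d.insert i false) applicable
    else if emp_type == "TYPE-3" then
      (PySem.List.pyRange 1 11 1).foldl (fun d i => d.insert i false) applicable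
    else applicable
  applicable.items

-- ===== PORT B =====
-- index (from k) of the first true entry, None if there is none  (Python's next((k for k,p in enumerate(preds) if p), None))
def pvFirstTrueIdx : List Bool → Int → Option Int
  | [], _ => none
  | p :: rest, k => if p then some k else pvFirstTrueIdx rest (k + 1)

-- column table: for condition i (5..10), the categories (None = no match) on which it applies
def pvTrueCats (i : Int) : List (Option Int) :=
  if i == 5 then [some 0, some 1, none]
  else if i == 6 then [some 0, none]
  else if i == 7 then [some 3, some 4, none]
  else if i == 8 then [some 4, some 5, none]
  else if i == 9 then [some 0, none]
  else [some 0, none]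

def analyze_hardcoded_conditions_alt (emp_type : String) (position : String) : List (Int × Bool) :=
  if emp_type == "TYPE-3" then
    (PySem.List.pyRange 1 11 1).map (fun i => (i, false))
  else if emp_type == "TYPE-2" then
    (PySem.List.pyRange 1 11 1).map (fun i => (i, decide (i ≤ 4)))
  else if !(emp_type == "TYPE-1") then
    (PySem.List.pyRange 1 11 1).map (fun i => (i, true))
  else
    let preds : List Bool :=
      [PySem.Str.isIn "ASSEMBLY INSPECTOR" position,
       PySem.Str.isIn "AQL INSPECTOR" position,
       pvManagerPositions.any (fun pos => PySem.Str.isIn pos (PySem.Str.upper position)),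
       PySem.Str.isIn "LINE LEADER" position,
       PySem.Str.isIn "AUDIT" position || PySem.Str.isIn "TRAINING" position,
       PySem.Str.isIn "MODEL MASTER" position,
       PySem.Str.isIn "GROUP LEADER" position]
    let cat := pvFirstTrueIdx preds 0
    (PySem.List.pyRange 1 11 1).map (fun i => (i, decide (i ≤ 4) || (pvTrueCats i).contains cat))

-- ===== PRECONDITION & SPEC =====
def Spec_analyze_hardcoded_conditions (emp_type : String) (position : String) (out : List (Int × Bool)) : Prop := out = analyze_hardcoded_conditions_alt emp_type position
instance (emp_type : String) (position : String) (out : List (Int × Bool)) : Decidable (Spec_analyze_hardcoded_conditions emp_type position out) := by unfold Spec_analyze_hardcoded_conditions; infer_instance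

-- ===== CLAIM =====
def Claim_equal_analyze_hardcoded_conditions : Prop := ∀ (emp_type : String) (position : String), Dom_analyze_hardcoded_conditions emp_type position → Spec_analyze_hardcoded_conditions emp_type position (analyze_hardcoded_conditions emp_type position)

-- ===== LEMMAS AND PROOFS =====

-- ===== VERDICT =====
set_option maxHeartbeats 2000000 in
theorem analyze_hardcoded_conditions_spec : Claim_equal_analyze_hardcoded_conditions := by
  intro emp_type position _
  unfold Spec_analyze_hardcoded_conditions analyze_hardcoded_conditions analyze_hardcoded_conditions_alt
  by_cases h1 : emp_type = "TYPE-1"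
  · subst h1
    generalize (PySem.Str.isIn "ASSEMBLY INSPECTOR" position) = c1
    generalize (PySem.Str.isIn "AQL INSPECTOR" position) = c2
    generalize (pvManagerPositions.any (fun pos => PySem.Str.isIn pos (PySem.Str.upper position))) = c3
    generalize (PySem.Str.isIn "LINE LEADER" position) = c4
    generalize (PySem.Str.isIn "AUDIT" position || PySem.Str.isIn "TRAINING" position) = c5
    generalize (PySem.Str.isIn "MODEL MASTER" position) = c6
    generalize (PySem.Str.isIn "GROUP LEADER" position) = c7
    cases c1 <;> cases c2 <;> cases c3 <;> cases c4 <;> cases c5 <;> cases c6 <;> cases c7 <;> rfl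
  · by_cases h2 : emp_type = "TYPE-2"
    · subst h2; rfl
    · by_cases h3 : emp_type = "TYPE-3"
      · subst h3; rfl
      · have e1 : (emp_type == "TYPE-1") = false := by simpa using h1
        have e2 : (emp_type == "TYPE-2") = false := by simpa using h2
        have e3 : (emp_type == "TYPE-3") = false := by simpa using h3
        simp only [e1, e2, e3]
        rfl
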